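-- pv_equiv track=rewrite | github.com/kinaneb/PYTHON_algo | permutations_and_binary_search/tp4_ex3.py | trouveOps
-- ===== SOURCE A (Python) =====
-- def trouveOps(T,x):
--   # A REMPLIR/MODIFIER !!
--   if (len(T) == 0): return False, 1
--   m = len(T)//2
--   if (x == T[m]): return True,2
--   elif (x < T[m]):
--     ops = 3
--     trouve, op = trouveOps(T[:m],x)
--     ops += op
--     return trouve, ops
--   else:
--     ops = 3
--     trouve, op = trouveOps(T[m+1:],x)
--     ops += op
--     return trouve, ops
-- ===== SOURCE B (Python) =====
-- def trouveOps(T, x):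
--     # Iterative lo/hi binary search over the original list: no slicing, same midpoints and op counts.
--     lo, hi, ops = 0, len(T), 0
--     while lo < hi:
--         m = lo + (hi - lo) // 2
--         if x == T[m]:
--             return True, ops + 2
--         ops += 3
--         if x < T[m]:
--             hi = m
--         else:
--             lo = m + 1
--     return False, ops + 1
-- ===== Notes on version B (the rewrite author's own statement) =====
-- stated objective: alternative
-- what changed: Replaced A's recursion that copies a slice of the list at every step with an iterative lo/hi index-bound binary search that never copies, keeping the same midpoints and the same operation count.
import Mathlib
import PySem

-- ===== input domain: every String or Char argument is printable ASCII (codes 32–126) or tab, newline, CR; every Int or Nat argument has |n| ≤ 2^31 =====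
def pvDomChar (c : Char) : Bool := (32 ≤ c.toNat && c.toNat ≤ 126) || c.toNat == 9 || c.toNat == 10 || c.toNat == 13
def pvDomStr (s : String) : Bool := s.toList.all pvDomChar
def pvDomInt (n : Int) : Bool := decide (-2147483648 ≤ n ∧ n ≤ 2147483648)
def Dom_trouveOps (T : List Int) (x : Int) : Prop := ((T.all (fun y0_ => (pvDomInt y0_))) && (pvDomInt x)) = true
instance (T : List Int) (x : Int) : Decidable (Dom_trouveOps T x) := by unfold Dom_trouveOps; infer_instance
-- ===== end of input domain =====

-- B replaces A's slice-copying recursion with an iterative lo/hi index-bound binary search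
-- over the original list (same midpoints, same op counts), avoiding the per-step slice copies.


-- ===== PORT A =====
-- T[m] with 0 ≤ m = len//2 < len is always in range, so getD is exact;
-- T[:m] = take m and T[m+1:] = drop (m+1) are exact for these nonnegative bounds.
def trouveOps (T : List Int) (x : Int) : Bool × Int :=
  if T.length = 0 then (false, 1)
  else if x = T.getD (T.length / 2) 0 then (true, 2)
  else if x < T.getD (T.length / 2) 0 then
    ((trouveOps (T.take (T.length / 2)) x).1, 3 + (trouveOps (T.take (T.length / 2)) x).2)
  else
    ((trouveOps (T.drop (T.length / 2 + 1)) x).1, 3 + (trouveOps (T.drop (T.length / 2 + 1)) x).2)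
termination_by T.length
decreasing_by
  · simp only [List.length_take]; omega
  · simp only [List.length_drop]; omega

-- ===== PORT B =====
-- the while-loop of Source B as recursion on the shrinking span hi - lo
def trouveOpsGo (T : List Int) (x : Int) (lo hi : Nat) (ops : Int) : Bool × Int :=
  if lo < hi then
    if x = T.getD (lo + (hi - lo) / 2) 0 then (true, ops + 2)
    else if x < T.getD (lo + (hi - lo) / 2) 0 then trouveOpsGo T x lo (lo + (hi - lo) / 2) (ops + 3)
    else trouveOpsGo T x (lo + (hi - lo) / 2 + 1) hi (ops + 3)
  else (false, ops + 1)
termination_by hi - lo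
decreasing_by all_goals omega

def trouveOps_alt (T : List Int) (x : Int) : Bool × Int :=
  trouveOpsGo T x 0 T.length 0

-- ===== PRECONDITION & SPEC =====
def Spec_trouveOps (T : List Int) (x : Int) (out : Bool × Int) : Prop := out = trouveOps_alt T x
instance (T : List Int) (x : Int) (out : Bool × Int) : Decidable (Spec_trouveOps T x out) := by unfold Spec_trouveOps; infer_instance

-- ===== CLAIM (what is proved, stated in full; the proofs are below) =====
def Claim_equal_trouveOps : Prop := ∀ (T : List Int) (x : Int), Dom_trouveOps T x → Spec_trouveOps T x (trouveOps T x)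

-- ===== LEMMAS AND PROOFS =====

-- empty-list unfolding of A
theorem trouveOps_nil (x : Int) : trouveOps [] x = (false, 1) := by
  rw [trouveOps]; simp

-- B's loop on the span [lo, hi) computes A's answer on the sublist (T.drop lo).take (hi - lo),
-- with ops added to the count.
theorem go_eq (T : List Int) (x : Int) :
    ∀ n lo hi ops, hi - lo = n → hi ≤ T.length →
      trouveOpsGo T x lo hi ops =
        ((trouveOps ((T.drop lo).take (hi - lo)) x).1,
         (trouveOps ((T.drop lo).take (hi - lo)) x).2 + ops) := by
  intro n
  induction n using Nat.strong_induction_on with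
  | _ n ih =>
    intro lo hi ops hn hhi
    by_cases hlt : lo < hi
    · have hlen : ((T.drop lo).take (hi - lo)).length = hi - lo := by
        simp [List.length_take, List.length_drop]; omega
      set S := (T.drop lo).take (hi - lo) with hS
      have hSne : S.length ≠ 0 := by omega
      set m' := (hi - lo) / 2 with hm'
      have hm'lt : m' < hi - lo := by omega
      have hv : S.getD (S.length / 2) 0 = T.getD (lo + m') 0 := by
        have h1 : lo + m' < T.length := by omega
        rw [hlen]
        rw [List.getD_eq_getElem?_getD, List.getD_eq_getElem?_getD]
        rw [List.getElem?_eq_getElem (by omega), List.getElem?_eq_getElem h1]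
        simp [hS, List.getElem_take, List.getElem_drop, hm']
      rw [trouveOpsGo]
      rw [trouveOps]
      simp only [if_pos hlt, if_neg hSne, ← hm']
      rw [hv]
      by_cases heq : x = T.getD (lo + m') 0
      · simp only [if_pos heq, Prod.mk.injEq]
        exact ⟨by simp, by ring⟩
      · simp only [if_neg heq]
        by_cases hxl : x < T.getD (lo + m') 0
        · simp only [if_pos hxl]
          have hstep : S.take (S.length / 2) = (T.drop lo).take ((lo + m') - lo) := by
            rw [hlen, hS, List.take_take]
            congr 1
            omega
          rw [hstep]
          rw [ih m' (by omega) lo (lo + m') (ops + 3) (by omega) (by omega)]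
          simp only [Prod.mk.injEq]
          exact ⟨by simp, by ring⟩
        · simp only [if_neg hxl]
          have hstep : S.drop (S.length / 2 + 1) =
              (T.drop (lo + m' + 1)).take (hi - (lo + m' + 1)) := by
            rw [hlen, hS, List.drop_take, List.drop_drop]
            congr 1
            omega
          rw [hstep]
          rw [ih (hi - (lo + m' + 1)) (by omega) (lo + m' + 1) hi (ops + 3) (by omega) hhi]
          simp only [Prod.mk.injEq]
          exact ⟨by simp, by ring⟩
    · have h0 : hi - lo = 0 := by omega
      rw [trouveOpsGo]
      rw [if_neg hlt, h0]
      simp only [List.take_zero, trouveOps_nil, Prod.mk.injEq]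
      exact ⟨by simp, by ring⟩

-- ===== VERDICT (by name: the statement is the Claim_ definition above) =====
theorem trouveOps_spec : Claim_equal_trouveOps := by
  intro T x _
  unfold Spec_trouveOps trouveOps_alt
  rw [go_eq T x T.length 0 T.length 0 (by omega) (le_refl _)]
  simp
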